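-- pv_equiv track=rewrite | github.com/ViliKautto/Python-kurssi | alimerkkijono.py | pisin_jarjestetty_alimerkkijono
-- ===== SOURCE A (Python) =====
-- def pisin_jarjestetty_alimerkkijono(syöte):
--     aakkoset = "abcdefghijklmnopqrstuvwxyzåäö"
--     syöte = syöte.strip(",")
--     ainoa_merkki=[]
--     i = 1
--     p = len(syöte)
--     if len(syöte) == 1:
--         return syöte
--     if len(syöte) == 0:
--         return syöte
--     else:
--         mjono = syöte[0]
--         jono = ""
--         while i < p:
--             k1 = syöte[i]
--             k2 = syöte[i-1]
--             if aakkoset.index(k2) < aakkoset.index(k1):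
--                 mjono = mjono + k1
--                 if len(mjono) > len(jono):
--                     jono = mjono
--             else:
--                 ainoa_merkki.append(k2)
--                 mjono = k1
--             i += 1
--         if len(jono) == 0:
--             jono = (ainoa_merkki[0])
--         return jono
-- ===== SOURCE B (Python) =====
-- def pisin_jarjestetty_alimerkkijono(syöte):
--     aakkoset = "abcdefghijklmnopqrstuvwxyzåäö"
--     syöte = syöte.strip(",")
--     n = len(syöte)
--     if n <= 1:
--         return syöte
--     best = ""
--     for i in range(n):
--         # end of the increasing run starting at i, recomputed from scratch
--         j = i + 1
--         while j < n and aakkoset.index(syöte[j-1]) < aakkoset.index(syöte[j]):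
--             j += 1
--         if j - i > len(best):
--             best = syöte[i:j]
--     return best
-- ===== Notes on version B (the rewrite author's own statement) =====
-- stated objective: alternative
-- what changed: A's single fused adjacent-pair scan that grows the current run, updates the running best and keeps a fallback list is replaced by a brute-force search: for EVERY start position B recomputes from scratch the end of the increasing run starting there and a strict > update keeps the first longest candidate; no run state is carried across positions and the fallback disappears (the length-1 candidate at position 0 covers it).
import Mathlib
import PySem

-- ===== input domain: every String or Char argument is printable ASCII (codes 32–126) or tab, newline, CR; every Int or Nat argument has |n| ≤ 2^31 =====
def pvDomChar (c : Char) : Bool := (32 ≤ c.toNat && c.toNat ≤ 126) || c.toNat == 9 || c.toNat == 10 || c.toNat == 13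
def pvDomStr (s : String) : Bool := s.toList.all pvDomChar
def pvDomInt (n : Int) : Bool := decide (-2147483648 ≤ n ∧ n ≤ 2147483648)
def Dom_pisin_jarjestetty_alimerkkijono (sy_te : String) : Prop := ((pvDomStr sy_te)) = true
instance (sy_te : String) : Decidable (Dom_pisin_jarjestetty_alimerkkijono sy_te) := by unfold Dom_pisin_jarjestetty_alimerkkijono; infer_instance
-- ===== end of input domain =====

-- B replaces A's single fused scan (current run + running best + fallback list) by a brute-force
-- search: for every suffix recompute its longest increasing prefix, keep the first longest (alternative).

-- ===== PORT A =====
def pvAak : String := "abcdefghijklmnopqrstuvwxyzåäö"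

-- aakkoset.index(c): Python's str.index raises ValueError when c is absent (outside Pre_);
-- find returns -1 there instead, and is exact (= index) whenever c occurs, which Pre_ guarantees.
def pvIdx (c : Char) : Int := PySem.Str.find pvAak (String.mk [c])

-- A's while loop; prev = syöte[i-1], state (mjono, jono, ainoa_merkki), over the chars syöte[1:]
def pvALoop (prev : Char) (mjono jono ainoa : List Char) : List Char → List Char × List Char
  | [] => (jono, ainoa)
  | k1 :: rest =>
    if pvIdx prev < pvIdx k1 then
      pvALoop k1 (mjono ++ [k1])
        (if (mjono ++ [k1]).length > jono.length then mjono ++ [k1] else jono) ainoa rest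
    else
      pvALoop k1 [k1] jono (ainoa ++ [prev]) rest

def pisin_jarjestetty_alimerkkijono (sy_te : String) : String :=
  -- syöte = syöte.strip(",") — written out at each use
  match (PySem.Str.stripChars sy_te ",").toList with
  | [] => PySem.Str.stripChars sy_te ","          -- len ≤ 1: return syöte (A tests ==1 then ==0)
  | [_] => PySem.Str.stripChars sy_te ","
  | c0 :: rest =>
    -- .1 = jono, .2 = ainoa_merkki; ainoa_merkki[0] as take 1 (nonempty whenever jono = [] here)
    String.mk (if (pvALoop c0 [c0] [] [] rest).1.length = 0
               then (pvALoop c0 [c0] [] [] rest).2.take 1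
               else (pvALoop c0 [c0] [] [] rest).1)

-- ===== PORT B =====
def pvAakB : String := "abcdefghijklmnopqrstuvwxyzåäö"

-- B's aakkoset.index(c), as in port A: find, exact whenever c occurs (guaranteed by Pre_)
def pvIdxB (c : Char) : Int := PySem.Str.find pvAakB (String.mk [c])

-- the inner while loop: j += 1 while j < n and index(s[j-1]) < index(s[j]);
-- s[j-1], s[j] are always in range in Source B, so getD is exact here
def pvInner (l : List Char) (j : Nat) : Nat :=
  if h : j < l.length ∧ pvIdxB (l.getD (j - 1) 'a') < pvIdxB (l.getD j 'a') then
    pvInner l (j + 1)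
  else j
termination_by l.length - j
decreasing_by omega

-- the outer for i in range(n); best := s[i:j] on a strict > improvement
def pvOuter (l best : List Char) (i : Nat) : List Char :=
  if _h : i < l.length then
    pvOuter l
      (if pvInner l (i + 1) - i > best.length
       then (l.drop i).take (pvInner l (i + 1) - i) else best) (i + 1)
  else best
termination_by l.length - i

def pisin_jarjestetty_alimerkkijono_alt (sy_te : String) : String :=
  if (PySem.Str.stripChars sy_te ",").toList.length ≤ 1 then PySem.Str.stripChars sy_te ","
  else String.mk (pvOuter (PySem.Str.stripChars sy_te ",").toList [] 0)

-- ===== PRECONDITION & SPEC =====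
-- Pre_ excludes exactly the inputs on which Python A raises ValueError: after stripping commas,
-- a string of length ≥ 2 containing a character outside the alphabet "a…zåäö" makes str.index raise.
def Pre_pisin_jarjestetty_alimerkkijono (sy_te : String) : Prop :=
  (PySem.Str.stripChars sy_te ",").toList.length ≤ 1 ∨
    (PySem.Str.stripChars sy_te ",").toList.all
      (fun c => "abcdefghijklmnopqrstuvwxyzåäö".toList.contains c) = true
instance (sy_te : String) : Decidable (Pre_pisin_jarjestetty_alimerkkijono sy_te) := by
  unfold Pre_pisin_jarjestetty_alimerkkijono; infer_instance

def pvWitness_pisin_jarjestetty_alimerkkijono : String := "abcba"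

def Spec_pisin_jarjestetty_alimerkkijono (sy_te : String) (out : String) : Prop := out = pisin_jarjestetty_alimerkkijono_alt sy_te
instance (sy_te : String) (out : String) : Decidable (Spec_pisin_jarjestetty_alimerkkijono sy_te out) := by unfold Spec_pisin_jarjestetty_alimerkkijono; infer_instance

-- ===== CLAIM (what is proved, stated in full; the proofs are below) =====
def Claim_equal_pisin_jarjestetty_alimerkkijono : Prop := ∀ (sy_te : String), Dom_pisin_jarjestetty_alimerkkijono sy_te → Pre_pisin_jarjestetty_alimerkkijono sy_te → Spec_pisin_jarjestetty_alimerkkijono sy_te (pisin_jarjestetty_alimerkkijono sy_te)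

-- ===== LEMMAS AND PROOFS =====

-- proof-layer model 1: B restated structurally on suffix lists
def pvRunFromAux (cand : List Char) (last : Char) : List Char → List Char
  | [] => cand
  | c :: rest =>
    if pvIdx last < pvIdx c then pvRunFromAux (cand ++ [c]) c rest else cand

def pvBrute (best : List Char) : List Char → List Char
  | [] => best
  | c :: rest =>
    pvBrute (if (pvRunFromAux [c] c rest).length > best.length
             then pvRunFromAux [c] c rest else best) rest

-- length of the increasing extension after lastc
def pvExtLen (lastc : Char) : List Char → Nat
  | [] => 0
  | c :: t => if pvIdx lastc < pvIdx c then 1 + pvExtLen c t else 0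

-- proof-layer common model: the list of maximal increasing runs and first-longest selection
def pvBRuns (prev : Char) (cur : List Char) : List Char → List (List Char)
  | [] => [cur]
  | c :: rest =>
    if pvIdx prev < pvIdx c then pvBRuns c (cur ++ [c]) rest
    else cur :: pvBRuns c [c] rest

def pvBest (best : List Char) : List (List Char) → List Char
  | [] => best
  | r :: rs => pvBest (if r.length > best.length then r else best) rs

def pvRunsOf : List Char → List (List Char)
  | [] => []
  | c :: t => pvBRuns c [c] t

def pvLastOf (c : Char) : List Char → Char
  | [] => c
  | e :: t => pvLastOf e t

def pvChain (prev : Char) : List Char → Prop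
  | [] => True
  | c :: t => pvIdx prev < pvIdx c ∧ pvChain c t

-- "the character just before rem breaks (or rem is empty)"
def pvBrkAt (lastc : Char) : List Char → Prop
  | [] => True
  | h :: _ => ¬ pvIdx lastc < pvIdx h

theorem pvALoop_cons (prev k1 : Char) (mjono jono ainoa rest : List Char) :
    pvALoop prev mjono jono ainoa (k1 :: rest) =
    if pvIdx prev < pvIdx k1 then
      pvALoop k1 (mjono ++ [k1])
        (if (mjono ++ [k1]).length > jono.length then mjono ++ [k1] else jono) ainoa rest
    else pvALoop k1 [k1] jono (ainoa ++ [prev]) rest := rfl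

theorem pvRunFromAux_cons (cand : List Char) (last c : Char) (rest : List Char) :
    pvRunFromAux cand last (c :: rest) =
    if pvIdx last < pvIdx c then pvRunFromAux (cand ++ [c]) c rest else cand := rfl

theorem pvBRuns_cons (prev c : Char) (cur rest : List Char) :
    pvBRuns prev cur (c :: rest) =
    if pvIdx prev < pvIdx c then pvBRuns c (cur ++ [c]) rest
    else cur :: pvBRuns c [c] rest := rfl

theorem pvBest_cons (best r : List Char) (rs : List (List Char)) :
    pvBest best (r :: rs) = pvBest (if r.length > best.length then r else best) rs := rfl

-- the inner for-loop consumes exactly the increasing extension ext and stops at rem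
theorem pvRunFromAux_spec : ∀ (ext : List Char) (cand : List Char) (lastc : Char) (rem : List Char),
    pvChain lastc ext →
    pvBrkAt (pvLastOf lastc ext) rem →
    pvRunFromAux cand lastc (ext ++ rem) = cand ++ ext := by
  intro ext
  induction ext with
  | nil =>
    intro cand lastc rem _ hbrk
    cases rem with
    | nil => simp [pvRunFromAux]
    | cons h t =>
      simp only [pvLastOf] at hbrk
      simp only [List.nil_append, List.append_nil, pvRunFromAux_cons]
      rw [if_neg hbrk]
  | cons e ext ih =>
    intro cand lastc rem hch hbrk
    obtain ⟨hlt, hch'⟩ := hch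
    simp only [List.cons_append, pvRunFromAux_cons, if_pos hlt]
    rw [ih (cand ++ [e]) e rem hch' hbrk]
    simp

-- pvBRuns splits off exactly the maximal increasing extension
theorem pvBRuns_decomp : ∀ (rest : List Char) (prev : Char) (cur : List Char),
    ∃ ext rem, rest = ext ++ rem ∧
      pvChain prev ext ∧
      pvBrkAt (pvLastOf prev ext) rem ∧
      pvBRuns prev cur rest = (cur ++ ext) :: pvRunsOf rem := by
  intro rest
  induction rest with
  | nil =>
    intro prev cur
    exact ⟨[], [], rfl, trivial, trivial, by simp [pvBRuns, pvRunsOf]⟩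
  | cons c t ih =>
    intro prev cur
    by_cases hlt : pvIdx prev < pvIdx c
    · obtain ⟨ext, rem, ht, hch, hbrk, hruns⟩ := ih c (cur ++ [c])
      refine ⟨c :: ext, rem, by simp [ht], ⟨hlt, hch⟩, hbrk, ?_⟩
      rw [pvBRuns_cons, if_pos hlt, hruns]
      simp
    · exact ⟨[], c :: t, rfl, trivial, hlt, by rw [pvBRuns_cons, if_neg hlt]; simp [pvRunsOf]⟩

-- starts strictly inside a run only yield shorter candidates: they never update best
theorem pvBrute_skip : ∀ (ext : List Char) (lastc : Char) (rem best : List Char),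
    pvChain lastc ext →
    pvBrkAt (pvLastOf lastc ext) rem →
    ext.length < best.length →
    pvBrute best (ext ++ rem) = pvBrute best rem := by
  intro ext
  induction ext with
  | nil => intro _ _ _ _ _ _; rfl
  | cons e ext ih =>
    intro lastc rem best hch hbrk hlen
    obtain ⟨_, hch'⟩ := hch
    show pvBrute (if (pvRunFromAux [e] e (ext ++ rem)).length > best.length
                  then pvRunFromAux [e] e (ext ++ rem) else best) (ext ++ rem) = pvBrute best rem
    rw [pvRunFromAux_spec ext [e] e rem hch' (by exact hbrk)]
    rw [if_neg (by simp at hlen ⊢; omega)]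
    exact ih e rem best hch' hbrk (by simp at hlen ⊢; omega)

-- the brute-force search computes first-longest over the maximal runs
theorem pvBrute_eq_best : ∀ (n : Nat) (s : List Char), s.length ≤ n →
    ∀ best, pvBrute best s = pvBest best (pvRunsOf s) := by
  intro n
  induction n with
  | zero =>
    intro s hs best
    have : s = [] := List.eq_nil_of_length_eq_zero (Nat.le_zero.mp hs)
    subst this; rfl
  | succ m ih =>
    intro s hs best
    cases s with
    | nil => rfl
    | cons c t =>
      obtain ⟨ext, rem, ht, hch, hbrk, hruns⟩ := pvBRuns_decomp t c [c]
      have hcand : pvRunFromAux [c] c t = [c] ++ ext := by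
        rw [ht]; exact pvRunFromAux_spec ext [c] c rem hch hbrk
      show pvBrute (if (pvRunFromAux [c] c t).length > best.length
                    then pvRunFromAux [c] c t else best) t = pvBest best (pvRunsOf (c :: t))
      rw [hcand]
      set best' := if ([c] ++ ext).length > best.length then [c] ++ ext else best with hb'
      have hlen' : ext.length < best'.length := by
        rw [hb']; split_ifs with h
        · simp
        · simp at h ⊢; omega
      have h1 : pvBrute best' t = pvBrute best' rem := by
        rw [ht]; exact pvBrute_skip ext c rem best' hch hbrk hlen'
      have hremlen : rem.length ≤ m := by
        have := hs; rw [ht] at this; simp at this; omega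
      rw [h1, ih rem hremlen best']
      show _ = pvBest best (pvBRuns c [c] t)
      rw [hruns, pvBest_cons, hb']
  -- selection over runs headed by (cur ++ ext) is the same update

-- ---------- A-side (from the fused loop to pvBest over pvBRuns) ----------

-- folding the "longer wins, first among ties" update through an extension f of cur
theorem pv_upd_upd (j cur f : List Char) (h : cur <+: f) :
    (if f.length > (if cur.length > j.length then cur else j).length then f
     else if cur.length > j.length then cur else j) =
    if f.length > j.length then f else j := by
  have hle := h.length_le
  by_cases h1 : cur.length > j.length
  · rw [if_pos h1]
    by_cases h2 : f.length > cur.length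
    · rw [if_pos h2, if_pos (by omega)]
    · rw [if_neg h2, if_pos (by omega)]
      exact h.eq_of_length (by omega)
  · rw [if_neg h1]

theorem pvBRuns_head : ∀ (rest : List Char) (prev : Char) (cur : List Char),
    ∃ r rs, pvBRuns prev cur rest = r :: rs ∧ cur <+: r := by
  intro rest
  induction rest with
  | nil => exact fun prev cur => ⟨cur, [], rfl, List.prefix_refl cur⟩
  | cons c rest ih =>
    intro prev cur
    by_cases hlt : pvIdx prev < pvIdx c
    · obtain ⟨r, rs, hr, hpre⟩ := ih c (cur ++ [c])
      exact ⟨r, rs, by rw [pvBRuns_cons, if_pos hlt, hr], (List.prefix_append cur [c]).trans hpre⟩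
    · exact ⟨cur, pvBRuns c [c] rest, by rw [pvBRuns_cons, if_neg hlt], List.prefix_refl cur⟩

-- selecting from (if cur beats j then cur else j) over runs whose head extends cur = selecting from j
theorem pvBest_upd (rest : List Char) (j : List Char) (prev : Char) (cur : List Char) :
    pvBest (if cur.length > j.length then cur else j) (pvBRuns prev cur rest) =
    pvBest j (pvBRuns prev cur rest) := by
  obtain ⟨r, rs, hr, hpre⟩ := pvBRuns_head rest prev cur
  rw [hr, pvBest_cons, pvBest_cons, pv_upd_upd j cur r hpre]

-- A's jono never shrinks
theorem pvALoop_mono : ∀ (rest : List Char) (prev : Char) (mjono jono ainoa : List Char),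
    jono.length ≤ ((pvALoop prev mjono jono ainoa rest).1).length := by
  intro rest
  induction rest with
  | nil => intro _ _ jono _; exact le_refl _
  | cons k1 rest ih =>
    intro prev mjono jono ainoa
    rw [pvALoop_cons]
    by_cases hlt : pvIdx prev < pvIdx k1
    · rw [if_pos hlt]
      refine le_trans ?_ (ih k1 (mjono ++ [k1]) _ ainoa)
      split_ifs with h
      · simp at h ⊢; omega
      · exact le_refl _
    · rw [if_neg hlt]
      exact ih k1 [k1] jono (ainoa ++ [prev])

-- main loop invariant once jono is at least as long as the current run
theorem pvALoop_eq_best : ∀ (rest : List Char) (prev : Char) (mjono jono ainoa : List Char),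
    mjono ≠ [] → mjono.length ≤ jono.length →
    (pvALoop prev mjono jono ainoa rest).1 = pvBest jono (pvBRuns prev mjono rest) := by
  intro rest
  induction rest with
  | nil =>
    intro prev mjono jono ainoa _ hle
    show jono = pvBest jono [mjono]
    rw [pvBest_cons, if_neg (by omega)]
    rfl
  | cons k1 rest ih =>
    intro prev mjono jono ainoa hne hle
    rw [pvALoop_cons, pvBRuns_cons]
    by_cases hlt : pvIdx prev < pvIdx k1
    · rw [if_pos hlt, if_pos hlt]
      have hgrow : (mjono ++ [k1]).length ≤
          (if (mjono ++ [k1]).length > jono.length then mjono ++ [k1] else jono).length := by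
        split_ifs with h
        · exact le_refl _
        · omega
      rw [ih k1 (mjono ++ [k1]) _ ainoa (by simp) hgrow]
      exact pvBest_upd rest jono k1 (mjono ++ [k1])
    · rw [if_neg hlt, if_neg hlt]
      rw [ih k1 [k1] jono (ainoa ++ [prev]) (by simp)
        (by have := List.length_pos_of_ne_nil hne; simp; omega)]
      rw [pvBest_cons, if_neg (by omega)]

-- the all-singleton-runs-so-far phase: jono = [], ainoa_merkki nonempty with head h
theorem pvALoop_empty_phase : ∀ (rest : List Char) (k h : Char) (t : List Char),
    (if ((pvALoop k [k] [] (h :: t) rest).1).length = 0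
     then ((pvALoop k [k] [] (h :: t) rest).2).take 1
     else (pvALoop k [k] [] (h :: t) rest).1) =
    pvBest [h] (pvBRuns k [k] rest) := by
  intro rest
  induction rest with
  | nil =>
    intro k h t
    show (if (0 : Nat) = 0 then [h] else []) = pvBest [h] [[k]]
    rw [if_pos rfl, pvBest_cons, if_neg (by simp)]
    rfl
  | cons k1 rest ih =>
    intro k h t
    rw [pvALoop_cons, pvBRuns_cons]
    by_cases hlt : pvIdx k < pvIdx k1
    · rw [if_pos hlt, if_pos hlt]
      simp only [List.cons_append, List.nil_append, List.length_cons, List.length_nil]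
      rw [if_pos (show (0:Nat) + 1 + 1 > 0 by omega)]
      have h2 : (2:Nat) ≤ ((pvALoop k1 [k, k1] [k, k1] (h :: t) rest).1).length := by
        have := pvALoop_mono rest k1 [k, k1] [k, k1] (h :: t)
        simpa using this
      rw [if_neg (show ¬((pvALoop k1 [k, k1] [k, k1] (h :: t) rest).1.length = 0) by omega)]
      rw [pvALoop_eq_best rest k1 [k, k1] [k, k1] (h :: t) (by simp) (le_refl _)]
      have hu := pvBest_upd rest [h] k1 [k, k1]
      rw [if_pos (by simp)] at hu
      exact hu
    · rw [if_neg hlt, if_neg hlt]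
      have hc : (h :: t) ++ [k] = h :: (t ++ [k]) := rfl
      rw [hc, ih k1 h (t ++ [k]), pvBest_cons, if_neg (by simp)]

-- ---------- B-side (from the index loops to pvBrute on suffix lists) ----------

theorem pvExtLen_le (lastc : Char) : ∀ (t : List Char), pvExtLen lastc t ≤ t.length := by
  intro t
  induction t generalizing lastc with
  | nil => exact le_refl _
  | cons c t ih =>
    show (if pvIdx lastc < pvIdx c then 1 + pvExtLen c t else 0) ≤ t.length + 1
    split_ifs with h
    · have := ih c; omega
    · omega

theorem pvRunFromAux_ext (t : List Char) : ∀ (cand : List Char) (lastc : Char),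
    pvRunFromAux cand lastc t = cand ++ t.take (pvExtLen lastc t) := by
  induction t with
  | nil => intro cand lastc; simp [pvRunFromAux, pvExtLen]
  | cons c t ih =>
    intro cand lastc
    rw [pvRunFromAux_cons]
    show _ = cand ++ (c :: t).take (if pvIdx lastc < pvIdx c then 1 + pvExtLen c t else 0)
    split_ifs with h
    · rw [ih (cand ++ [c]) c]
      simp [List.take_succ_cons, Nat.add_comm 1 (pvExtLen c t)]
    · simp

theorem pvInner_spec (l : List Char) : ∀ (k i : Nat), l.length - i ≤ k → 1 ≤ i →
    pvInner l i = i + pvExtLen (l.getD (i - 1) 'a') (l.drop i) := by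
  intro k
  induction k with
  | zero =>
    intro i hk _
    have hge : l.length ≤ i := by omega
    rw [pvInner, dif_neg (by omega)]
    simp [List.drop_eq_nil_of_le hge, pvExtLen]
  | succ m ih =>
    intro i hk h1
    by_cases hi : i < l.length
    · have hdrop : l.drop i = l.getD i 'a' :: l.drop (i + 1) := by
        rw [List.getD_eq_getElem l 'a' hi, List.drop_eq_getElem_cons hi]
      rw [pvInner, hdrop]
      show _ = i + if pvIdx (l.getD (i - 1) 'a') < pvIdx (l.getD i 'a')
                   then 1 + pvExtLen (l.getD i 'a') (l.drop (i + 1)) else 0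
      by_cases hlt : pvIdx (l.getD (i - 1) 'a') < pvIdx (l.getD i 'a')
      · rw [dif_pos ⟨hi, hlt⟩, if_pos hlt, ih (i + 1) (by omega) (by omega)]
        simp only [Nat.add_sub_cancel]
        omega
      · rw [dif_neg (by rintro ⟨_, h⟩; exact hlt h), if_neg hlt]
        omega
    · rw [pvInner, dif_neg (by omega)]
      simp [List.drop_eq_nil_of_le (by omega : l.length ≤ i), pvExtLen]

theorem pvOuter_spec (l : List Char) : ∀ (k i : Nat) (best : List Char), l.length - i ≤ k →
    pvOuter l best i = pvBrute best (l.drop i) := by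
  intro k
  induction k with
  | zero =>
    intro i best hk
    rw [pvOuter, dif_neg (by omega), List.drop_eq_nil_of_le (by omega)]
    rfl
  | succ m ih =>
    intro i best hk
    by_cases hi : i < l.length
    · have hdrop : l.drop i = l.getD i 'a' :: l.drop (i + 1) := by
        rw [List.getD_eq_getElem l 'a' hi, List.drop_eq_getElem_cons hi]
      have hinner : pvInner l (i + 1) = (i + 1) + pvExtLen (l.getD i 'a') (l.drop (i + 1)) := by
        rw [pvInner_spec l (l.length - (i + 1)) (i + 1) (le_refl _) (by omega)]
        simp
      set e := pvExtLen (l.getD i 'a') (l.drop (i + 1)) with he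
      have hel : e ≤ (l.drop (i + 1)).length := pvExtLen_le _ _
      have hcand : pvRunFromAux [l.getD i 'a'] (l.getD i 'a') (l.drop (i + 1)) =
          l.getD i 'a' :: (l.drop (i + 1)).take e := by
        rw [pvRunFromAux_ext]; rfl
      have hji : pvInner l (i + 1) - i = e + 1 := by omega
      have hclen : (pvRunFromAux [l.getD i 'a'] (l.getD i 'a') (l.drop (i + 1))).length = e + 1 := by
        rw [hcand]
        simp only [List.length_cons, List.length_take, Nat.min_eq_left hel]
      rw [pvOuter, dif_pos hi, ih (i + 1) _ (by omega), hdrop, hji, List.take_succ_cons, ← hcand,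
          ← hclen]
      rfl
    · rw [pvOuter, dif_neg (by omega), List.drop_eq_nil_of_le (by omega)]
      rfl

-- the two ports agree on every input (find-semantics makes both ports total)
theorem pv_ports_eq (sy_te : String) :
    pisin_jarjestetty_alimerkkijono sy_te = pisin_jarjestetty_alimerkkijono_alt sy_te := by
  unfold pisin_jarjestetty_alimerkkijono pisin_jarjestetty_alimerkkijono_alt
  rcases hl : (PySem.Str.stripChars sy_te ",").toList with _ | ⟨c0, _ | ⟨k1, rest⟩⟩
  · rfl
  · rfl
  · rw [if_neg (by simp)]
    -- B's side: index loops = brute over suffixes = first-longest over the maximal runs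
    rw [pvOuter_spec (c0 :: k1 :: rest) (c0 :: k1 :: rest).length 0 [] (by omega),
        List.drop_zero,
        pvBrute_eq_best (c0 :: k1 :: rest).length (c0 :: k1 :: rest) (le_refl _) []]
    show String.mk (if (pvALoop c0 [c0] [] [] (k1 :: rest)).1.length = 0
           then (pvALoop c0 [c0] [] [] (k1 :: rest)).2.take 1
           else (pvALoop c0 [c0] [] [] (k1 :: rest)).1) =
         String.mk (pvBest [] (pvBRuns c0 [c0] (k1 :: rest)))
    congr 1
    rw [pvALoop_cons, pvBRuns_cons]
    by_cases hlt : pvIdx c0 < pvIdx k1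
    · rw [if_pos hlt, if_pos hlt]
      simp only [List.cons_append, List.nil_append, List.length_cons, List.length_nil]
      rw [if_pos (show (0:Nat) + 1 + 1 > 0 by omega)]
      have h2 : (2:Nat) ≤ ((pvALoop k1 [c0, k1] [c0, k1] [] rest).1).length := by
        have := pvALoop_mono rest k1 [c0, k1] [c0, k1] []
        simpa using this
      rw [if_neg (show ¬((pvALoop k1 [c0, k1] [c0, k1] [] rest).1.length = 0) by omega)]
      rw [pvALoop_eq_best rest k1 [c0, k1] [c0, k1] [] (by simp) (le_refl _)]
      have hu := pvBest_upd rest [] k1 [c0, k1]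
      rw [if_pos (by simp)] at hu
      exact hu
    · rw [if_neg hlt, if_neg hlt]
      have hc : ([] : List Char) ++ [c0] = [c0] := rfl
      rw [hc, pvALoop_empty_phase rest k1 c0 [], pvBest_cons, if_pos (by simp)]

-- ===== VERDICT (by name: the statement is the Claim_ definition above) =====
theorem pisin_jarjestetty_alimerkkijono_spec : Claim_equal_pisin_jarjestetty_alimerkkijono := by
  intro sy_te _ _
  unfold Spec_pisin_jarjestetty_alimerkkijono
  exact pv_ports_eq sy_te
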